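-- pv_equiv track=rewrite | github.com/Elogeek/Count_the_vowels | word.py | get_letters_numbers
-- ===== SOURCE A (Python) =====
-- def get_letters_numbers(word, h=None):
--     nb_letters = 0
--
--     for letter in word:
--
--         if letter in ['a', 'b', 'c', 'd', 'e',
--                       'f', 'g', 'h', 'i', 'j',
--                       'k', 'l', 'm', 'n', 'o',
--                       'p', 'q', 'r', 's', 't',
--                       'u', 'v', 'w', 'x', 'y', 'z'
--                       ]:
--             nb_letters += 1
--     # Pay attention to the indentation
--     return nb_letters
-- ===== SOURCE B (Python) =====
-- def get_letters_numbers(word, h=None):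
--     counts = {}
--     for ch in word:
--         counts[ch] = counts.get(ch, 0) + 1
--     total = 0
--     for ch in 'abcdefghijklmnopqrstuvwxyz':
--         total += counts.get(ch, 0)
--     return total
-- ===== Notes on version B (the rewrite author's own statement) =====
-- stated objective: alternative
-- what changed: B builds a frequency table of the word in one pass and then sums the counts of the 26 lowercase letters, instead of scanning the word and testing each character against a 26-element list.
import Mathlib
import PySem

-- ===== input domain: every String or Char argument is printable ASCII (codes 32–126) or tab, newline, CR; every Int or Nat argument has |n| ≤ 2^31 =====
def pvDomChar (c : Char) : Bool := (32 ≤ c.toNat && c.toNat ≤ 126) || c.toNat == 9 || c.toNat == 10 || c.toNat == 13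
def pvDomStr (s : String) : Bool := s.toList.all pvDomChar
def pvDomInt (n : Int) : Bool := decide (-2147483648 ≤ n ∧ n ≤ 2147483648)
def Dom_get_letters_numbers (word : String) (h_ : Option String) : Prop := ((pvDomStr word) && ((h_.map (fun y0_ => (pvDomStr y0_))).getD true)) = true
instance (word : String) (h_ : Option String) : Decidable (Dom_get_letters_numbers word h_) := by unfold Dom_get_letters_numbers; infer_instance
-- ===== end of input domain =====

-- B builds a frequency table of the word in one pass and then sums the counts of the 26
-- lowercase letters, instead of testing each character of the word against a 26-element list.

-- ===== PORT A =====
def get_letters_numbers (word : String) (h_ : Option String) : Int :=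
  word.toList.foldl (fun nb_letters letter =>
    if letter ∈ ['a', 'b', 'c', 'd', 'e',
                 'f', 'g', 'h', 'i', 'j',
                 'k', 'l', 'm', 'n', 'o',
                 'p', 'q', 'r', 's', 't',
                 'u', 'v', 'w', 'x', 'y', 'z'] then nb_letters + 1 else nb_letters) 0

-- ===== PORT B =====
def get_letters_numbers_alt (word : String) (h_ : Option String) : Int :=
  let counts : PySem.Dict Char Int :=
    word.toList.foldl (fun d ch => d.insert ch (d.getD ch 0 + 1)) PySem.Dict.empty
  ("abcdefghijklmnopqrstuvwxyz").toList.foldl (fun total ch => total + counts.getD ch 0) 0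

-- ===== PRECONDITION & SPEC =====
def Spec_get_letters_numbers (word : String) (h_ : Option String) (out : Int) : Prop := out = get_letters_numbers_alt word h_
instance (word : String) (h_ : Option String) (out : Int) : Decidable (Spec_get_letters_numbers word h_ out) := by unfold Spec_get_letters_numbers; infer_instance

-- ===== CLAIM (what is proved, stated in full; the proofs are below) =====
def Claim_equal_get_letters_numbers : Prop := ∀ (word : String) (h_ : Option String), Dom_get_letters_numbers word h_ → Spec_get_letters_numbers word h_ (get_letters_numbers word h_)

-- ===== LEMMAS AND PROOFS =====

theorem pv_sum_map_add (A : List Char) (f g : Char → Int) :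
    (A.map (fun c => f c + g c)).sum = (A.map f).sum + (A.map g).sum := by
  induction A with
  | nil => simp
  | cons a A ih => simp [ih]; ring

-- Σ_{c ∈ A} [x = c] = count of x in A
theorem pv_sum_indicator (x : Char) (A : List Char) :
    (A.map (fun c => if x = c then (1:Int) else 0)).sum = (A.count x : Int) := by
  induction A with
  | nil => simp
  | cons a A ih =>
    simp only [List.map_cons, List.sum_cons, List.count_cons, ih]
    by_cases h : x = a
    · simp [h]; omega
    · have h' : ¬a = x := fun hc => h hc.symm
      simp [h, h']

-- counting matches in l = summing per-letter counts over a duplicate-free alphabet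
theorem pv_count_swap (l A : List Char) (hA : A.Nodup) :
    (l.map (fun x => if x ∈ A then (1:Int) else 0)).sum
      = (A.map (fun c => (l.count c : Int))).sum := by
  induction l with
  | nil => simp
  | cons x l ih =>
    simp only [List.map_cons, List.sum_cons, ih]
    have hmap : A.map (fun c => ((x :: l).count c : Int))
        = A.map (fun c => (if x = c then (1:Int) else 0) + (l.count c : Int)) := by
      apply List.map_congr_left
      intro c _
      simp only [List.count_cons]
      by_cases h : x = c
      · simp [h]; try omega
      · simp [h]
    rw [hmap, pv_sum_map_add, pv_sum_indicator]
    by_cases hx : x ∈ A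
    · rw [List.count_eq_one_of_mem hA hx]; simp [hx]
    · rw [List.count_eq_zero_of_not_mem hx]; simp [hx]

-- ===== VERDICT (by name: the statement is the Claim_ definition above) =====
theorem get_letters_numbers_spec : Claim_equal_get_letters_numbers := by
  intro word h_ _
  unfold Spec_get_letters_numbers get_letters_numbers get_letters_numbers_alt
  have hA : word.toList.foldl (fun nb_letters letter =>
      if letter ∈ ['a','b','c','d','e','f','g','h','i','j','k','l','m','n','o',
                   'p','q','r','s','t','u','v','w','x','y','z'] then nb_letters + 1 else nb_letters) 0
      = word.toList.foldl (fun nb letter =>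
          nb + (if letter ∈ ['a','b','c','d','e','f','g','h','i','j','k','l','m','n','o',
                   'p','q','r','s','t','u','v','w','x','y','z'] then (1:Int) else 0)) 0 := by
    apply PySem.List.foldl_congr_mem
    intro acc x _
    split_ifs <;> omega
  rw [hA, PySem.List.foldl_add, PySem.List.foldl_add]
  have halph : ("abcdefghijklmnopqrstuvwxyz").toList
      = ['a','b','c','d','e','f','g','h','i','j','k','l','m','n','o',
         'p','q','r','s','t','u','v','w','x','y','z'] := rfl
  simp only [halph, PySem.Dict.getD_foldl_insert_add_one, PySem.Dict.getD_empty, zero_add]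
  exact pv_count_swap _ _ (by decide)
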